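-- pv_equiv track=rewrite | github.com/H4ckF0rFun/Pwn-Mylib | random_predict.py | generateRandom
-- ===== SOURCE A (Python) =====
-- def generateRandom(ord,init):
--     result = 0
--     #copy table.
--     table = []
--     for t in init:
--         table.append(t)
--
--     f = 3
--     r = 0
--
--     for i in range(ord):
--         result = ((table[f] + table[r])>>1)&0x7fffffff
--         table[f] += table[r]
--         r = (r + 1 ) % 31
--         f = (f + 1) % 31
--     return result
-- ===== SOURCE B (Python) =====
-- def matmul(A, B):
--     M = 1 << 32
--     return [[sum(A[i][k] * B[k][j] for k in range(31)) % M
--              for j in range(31)] for i in range(31)]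
--
-- def generateRandom(ord, init):
--     # Binary exponentiation of the 31x31 companion matrix of the recurrence
--     # u[j] = u[j-3] + u[j-31] (mod 2^32) on the output-aligned state
--     # u_j = table[(j+3) % 31]: answer = ((T^ord u)[30] >> 1) & 0x7fffffff.
--     if ord <= 0:
--         return 0
--     M = 1 << 32
--     T = [[1 if j == i + 1 else 0 for j in range(31)] for i in range(30)]
--     T.append([1 if j in (0, 28) else 0 for j in range(31)])
--     R = [[1 if i == j else 0 for j in range(31)] for i in range(31)]
--     e = ord
--     while e:
--         if e & 1:
--             R = matmul(R, T)
--         T = matmul(T, T)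
--         e >>= 1
--     row = R[30]
--     # only state words with a nonzero weight contribute (skip the zero terms)
--     s = sum(row[j] * init[(j + 3) % 31] for j in range(31) if row[j])
--     return (s % M >> 1) & 0x7fffffff
-- ===== Notes on version B (the rewrite author's own statement) =====
-- stated objective: alternative
-- what changed: B replaces A's step-by-step simulation of the lagged-Fibonacci table by binary exponentiation of the 31x31 companion matrix of the recurrence u[j]=u[j-3]+u[j-31] mod 2^32; the answer is the dot product of the last matrix row with the rotated initial table, skipping zero-weight entries.
import Mathlib
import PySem

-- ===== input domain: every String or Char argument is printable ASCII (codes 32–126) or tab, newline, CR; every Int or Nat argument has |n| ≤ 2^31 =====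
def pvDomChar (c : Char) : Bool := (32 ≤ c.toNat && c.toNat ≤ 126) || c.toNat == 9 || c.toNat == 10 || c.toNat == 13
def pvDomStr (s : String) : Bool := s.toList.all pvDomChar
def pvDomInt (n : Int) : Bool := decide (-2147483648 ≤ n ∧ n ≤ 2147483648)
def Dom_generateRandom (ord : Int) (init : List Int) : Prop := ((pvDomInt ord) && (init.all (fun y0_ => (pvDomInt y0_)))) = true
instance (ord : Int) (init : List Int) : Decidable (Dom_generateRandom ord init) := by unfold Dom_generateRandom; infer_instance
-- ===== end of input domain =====

-- B replaces A's ord-step simulation of the lagged-Fibonacci table by binary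
-- exponentiation of the 31×31 companion matrix of the recurrence mod 2^32 (an
-- alternative algorithm; it overtakes A only for very large ord).

-- ===== PORT A =====
-- one iteration of A's loop (the loop variable i is unused by A's body)
def stepA (st : Int × List Int × Int × Int) (_i : Int) : Int × List Int × Int × Int :=
  let result := PySem.Int.band
      ((PySem.List.pyGetD st.2.1 st.2.2.1 0 + PySem.List.pyGetD st.2.1 st.2.2.2 0) >>> (1 : Nat))
      2147483647
  let table := PySem.List.pySetD st.2.1 st.2.2.1
      (PySem.List.pyGetD st.2.1 st.2.2.1 0 + PySem.List.pyGetD st.2.1 st.2.2.2 0)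
  let r := PySem.Int.mod (st.2.2.2 + 1) 31
  let f := PySem.Int.mod (st.2.2.1 + 1) 31
  (result, table, f, r)

def generateRandom (ord : Int) (init : List Int) : Int :=
  -- copy table
  let table := init.foldl (fun acc t => acc ++ [t]) ([] : List Int)
  ((PySem.List.pyRange 0 ord 1).foldl stepA (0, table, 3, 0)).1

-- ===== PORT B =====
-- R = identity
def idMat : List (List Int) :=
  (List.range 31).map (fun i => (List.range 31).map (fun j => if i = j then (1 : Int) else 0))

-- T = shift rows, last row has 1s at columns 0 and 28
def T0 : List (List Int) :=
  ((List.range 30).map (fun i => (List.range 31).map (fun j => if j = i + 1 then (1 : Int) else 0)))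
    ++ [(List.range 31).map (fun j => if j = 0 ∨ j = 28 then (1 : Int) else 0)]

-- matmul: entry (i,j) = sum_k A[i][k]*B[k][j] % 2**32
def matMul (A B : List (List Int)) : List (List Int) :=
  (List.range 31).map (fun i => (List.range 31).map (fun j =>
    PySem.Int.mod (((List.range 31).map
      (fun k => (A.getD i []).getD k 0 * (B.getD k []).getD j 0)).sum) 4294967296))

-- while e: if e & 1: R = matmul(R, T); T = matmul(T, T); e >>= 1
def powLoop : Nat → List (List Int) → List (List Int) → List (List Int)
  | 0, R, _ => R
  | e + 1, R, T =>
      powLoop ((e + 1) / 2) (if (e + 1) % 2 = 1 then matMul R T else R) (matMul T T)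
  termination_by e _ _ => e
  decreasing_by omega

-- s = sum(row[j] * init[(j+3)%31] for j in range(31) if row[j]); (s % 2**32 >> 1) & 0x7fffffff
def generateRandom_alt (ord : Int) (init : List Int) : Int :=
  if ord ≤ 0 then 0
  else
    let R := powLoop ord.toNat idMat T0
    let row := R.getD 30 []
    PySem.Int.band
      ((PySem.Int.mod
          ((((List.range 31).filter (fun j => row.getD j 0 != 0)).map
            (fun j => row.getD j 0 * init.getD ((j + 3) % 31) 0)).sum)
          4294967296) >>> (1 : Nat))
      2147483647

-- ===== PRECONDITION & SPEC =====
-- Pre_ excludes exactly the inputs on which Python A raises IndexError: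
-- a positive ord with a table shorter than 31 that the cursors run off (ord ≥ len-2).
def Pre_generateRandom (ord : Int) (init : List Int) : Prop :=
  1 ≤ ord → (31 ≤ init.length ∨ ord + 2 < (init.length : Int))
instance (ord : Int) (init : List Int) : Decidable (Pre_generateRandom ord init) := by
  unfold Pre_generateRandom; infer_instance

def pvWitness_generateRandom : Int × List Int := (5, [9, 8, 7, 6, 5, 4, 3, 2])

def Spec_generateRandom (ord : Int) (init : List Int) (out : Int) : Prop :=
  out = generateRandom_alt ord init
instance (ord : Int) (init : List Int) (out : Int) : Decidable (Spec_generateRandom ord init out) := by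
  unfold Spec_generateRandom; infer_instance

-- ===== CLAIM (what is proved, stated in full; the proofs are below) =====
def Claim_equal_generateRandom : Prop := ∀ (ord : Int) (init : List Int),
  Dom_generateRandom ord init → Pre_generateRandom ord init →
  Spec_generateRandom ord init (generateRandom ord init)

-- ===== LEMMAS AND PROOFS =====

-- reference trace of A's table and result (proof-side only)
def TA (init : List Int) : Nat → List Int
  | 0 => init
  | k + 1 =>
      let t := TA init k
      t.set ((3 + k) % 31) (t.getD ((3 + k) % 31) 0 + t.getD (k % 31) 0)

def RA (init : List Int) : Nat → Int
  | 0 => 0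
  | k + 1 => PySem.Int.band
      (((TA init k).getD ((3 + k) % 31) 0 + (TA init k).getD (k % 31) 0) >>> (1 : Nat)) 2147483647

-- the output-aligned stream: u_j = table[(j+3)%31] initially, u_j = u_{j-3} + u_{j-31}
def U (init : List Int) (j : Nat) : Int :=
  if j < 31 then init.getD ((j + 3) % 31) 0 else U init (j - 3) + U init (j - 31)
  termination_by j
  decreasing_by all_goals omega

-- which stream element slot s holds after k steps of A
def idx (k s : Nat) : Nat :=
  if k ≤ (s + 28) % 31 then (s + 28) % 31 else k + 30 - ((k - 1 - (s + 28) % 31) % 31)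

lemma copy_eq : ∀ (l acc : List Int), l.foldl (fun a t => a ++ [t]) acc = acc ++ l := by
  intro l
  induction l with
  | nil => simp
  | cons x xs ih => intro acc; simp [List.foldl_cons, ih]

lemma length_TA (init : List Int) (k : Nat) : (TA init k).length = init.length := by
  induction k with
  | zero => rfl
  | succ k ih => simp [TA, ih]

lemma mod31_natCast (m : Nat) : PySem.Int.mod ((m : Int)) 31 = ((m % 31 : Nat) : Int) := by
  simp

lemma modM_eq_emod (a : Int) : PySem.Int.mod a 4294967296 = a % 4294967296 := by
  exact PySem.Int.mod_eq_emod_of_pos (by norm_num)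

-- A's fold, characterised
lemma LA (init : List Int) (k : Nat) :
    (((List.range k).map (fun j : Nat => ((0 : Int) + (j : Int)))).foldl stepA (0, init, 3, 0)) =
      (RA init k, TA init k, (((3 + k) % 31 : Nat) : Int), ((k % 31 : Nat) : Int)) := by
  induction k with
  | zero => simp [TA, RA]
  | succ k ih =>
      rw [List.range_succ, List.map_append, List.foldl_append, ih]
      simp only [List.map_cons, List.map_nil, List.foldl_cons, List.foldl_nil, stepA,
        PySem.List.pyGetD_natCast, PySem.List.pySetD_natCast]
      have h1 : ((((3 + k) % 31 : Nat) : Int) + 1) = (((3 + k) % 31 + 1 : Nat) : Int) := by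
        push_cast; ring
      have h2 : (((k % 31 : Nat) : Int) + 1) = ((k % 31 + 1 : Nat) : Int) := by
        push_cast; ring
      rw [h1, h2, mod31_natCast, mod31_natCast]
      have h3 : ((3 + k) % 31 + 1) % 31 = (3 + (k + 1)) % 31 := by omega
      have h4 : (k % 31 + 1) % 31 = (k + 1) % 31 := by omega
      rw [h3, h4]
      simp [RA, TA]

-- idx arithmetic
lemma idx_f (k : Nat) : idx k ((3 + k) % 31) = k := by
  unfold idx; split_ifs <;> omega

lemma idx_r (k : Nat) : idx k (k % 31) = k + 28 := by
  unfold idx; split_ifs <;> omega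

lemma idx_f' (k : Nat) : idx (k + 1) ((3 + k) % 31) = k + 31 := by
  unfold idx; split_ifs <;> omega

lemma idx_stable (k s : Nat) (hs : s < 31) (h : s ≠ (3 + k) % 31) :
    idx (k + 1) s = idx k s := by
  unfold idx; split_ifs <;> omega

-- A's table after k steps, expressed through the stream U
lemma TA_U (init : List Int) (k : Nat)
    (H : 31 ≤ init.length ∨ k + 2 < init.length) :
    ∀ s, s < 31 → (TA init k).getD s 0 = U init (idx k s) := by
  induction k with
  | zero =>
      intro s hs
      have h1 : idx 0 s = (s + 28) % 31 := by unfold idx; split_ifs <;> omega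
      rw [h1, U, if_pos (by omega : (s + 28) % 31 < 31)]
      have h2 : ((s + 28) % 31 + 3) % 31 = s := by omega
      rw [h2]; rfl
  | succ k ih =>
      intro s hs
      have H' : 31 ≤ init.length ∨ k + 2 < init.length := by omega
      have ih' := ih H'
      have hf : (3 + k) % 31 < 31 := by omega
      have hr : k % 31 < 31 := by omega
      have hlen : (3 + k) % 31 < (TA init k).length := by
        rw [length_TA]; omega
      by_cases hcase : s = (3 + k) % 31
      · subst hcase
        simp only [TA, List.getD_eq_getElem?_getD]
        rw [List.getElem?_set_self hlen]
        simp only [Option.getD_some, ← List.getD_eq_getElem?_getD]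
        rw [ih' _ hf, ih' _ hr, idx_f, idx_r, idx_f']
        have hU : U init (k + 31) = U init (k + 28) + U init k := by
          rw [U, if_neg (by omega : ¬ k + 31 < 31)]
          have e1 : k + 31 - 3 = k + 28 := by omega
          have e2 : k + 31 - 31 = k := by omega
          rw [e1, e2]
        rw [hU]; exact add_comm _ _
      · simp only [TA, List.getD_eq_getElem?_getD]
        rw [List.getElem?_set_ne (by omega : (3 + k) % 31 ≠ s)]
        rw [← List.getD_eq_getElem?_getD, ih' _ hs, idx_stable k s hs hcase]

-- Python's '& 0x7fffffff' is reduction mod 2^31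
lemma Lband (a : Int) : PySem.Int.band a 2147483647 = a % 2147483648 := by
  have h : ∀ m : Nat, m &&& 2147483647 = m % 2147483648 := by
    intro m
    have := Nat.and_two_pow_sub_one_eq_mod m 31
    norm_num at this
    exact this
  have e : (2147483647 : Int).toNat = 2147483647 := rfl
  unfold PySem.Int.band
  split_ifs with h1 h2 h2
  · rw [e, h]
    omega
  · norm_num at h2
  · rw [e, Nat.and_comm, h]
    omega
  · norm_num at h2

-- reducing mod 2^32 before '>> 1 & 0x7fffffff' does not change the result
lemma Lkey (s : Int) :
    PySem.Int.band ((s % 4294967296) >>> (1 : Nat)) 2147483647 =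
      PySem.Int.band (s >>> (1 : Nat)) 2147483647 := by
  rw [Lband, Lband, Int.shiftRight_eq_div_pow, Int.shiftRight_eq_div_pow]
  norm_num
  omega

-- ===== ZMod matrix machinery for B =====

def toM (A : List (List Int)) : Matrix (Fin 31) (Fin 31) (ZMod 4294967296) :=
  Matrix.of fun i j => (((A.getD i.val []).getD j.val 0 : Int) : ZMod 4294967296)

def VecZ (init : List Int) (k : Nat) : Fin 31 → ZMod 4294967296 :=
  fun i => ((U init (k + i.val) : Int) : ZMod 4294967296)

lemma getD_map_range {α : Type} (f : Nat → α) (d : α) {n i : Nat} (h : i < n) :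
    (((List.range n).map f)).getD i d = f i := by
  simp [List.getD_eq_getElem?_getD, List.getElem?_range h]

lemma cast_pymod (a : Int) :
    ((PySem.Int.mod a 4294967296 : Int) : ZMod 4294967296) = (a : ZMod 4294967296) := by
  rw [modM_eq_emod]
  exact_mod_cast ZMod.intCast_mod a 4294967296

lemma sum_cast (f : Nat → Int) (n : Nat) :
    ((((List.range n).map f).sum : Int) : ZMod 4294967296) =
      ∑ j : Fin n, ((f j.val : Int) : ZMod 4294967296) := by
  have h1 : ((((List.range n).map f).sum : Int) : ZMod 4294967296) =
      ∑ j ∈ Finset.range n, ((f j : Int) : ZMod 4294967296) := by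
    induction n with
    | zero => simp
    | succ n ih =>
        rw [List.range_succ, List.map_append, List.sum_append, Finset.sum_range_succ, ← ih]
        push_cast
        simp
  rw [h1, ← Fin.sum_univ_eq_sum_range (fun j => ((f j : Int) : ZMod 4294967296)) n]

lemma toM_apply (A : List (List Int)) (i j : Fin 31) :
    toM A i j = (((A.getD i.val []).getD j.val 0 : Int) : ZMod 4294967296) := rfl

lemma toM_matMul (A B : List (List Int)) : toM (matMul A B) = toM A * toM B := by
  ext i j
  rw [Matrix.mul_apply, toM_apply]
  unfold matMul
  rw [getD_map_range _ _ i.isLt, getD_map_range _ _ j.isLt, cast_pymod, sum_cast]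
  refine Finset.sum_congr rfl (fun k _ => ?_)
  rw [toM_apply, toM_apply]
  push_cast
  ring

lemma toM_idMat : toM idMat = 1 := by
  ext i j
  rw [Matrix.one_apply, toM_apply]
  unfold idMat
  rw [getD_map_range _ _ i.isLt, getD_map_range _ _ j.isLt]
  by_cases h : i = j
  · simp [h]
  · have hv : i.val ≠ j.val := fun hv => h (Fin.ext hv)
    simp [hv, h]

lemma powLoop_inv (e : Nat) : ∀ R T, toM (powLoop e R T) = toM R * (toM T) ^ e := by
  induction e using Nat.strong_induction_on with
  | _ e ih =>
      cases e with
      | zero => intro R T; rw [powLoop, pow_zero, mul_one]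
      | succ e =>
          intro R T
          rw [powLoop, ih ((e + 1) / 2) (by omega), toM_matMul]
          have hsq : toM T * toM T = (toM T) ^ 2 := (sq (toM T)).symm
          by_cases hp : (e + 1) % 2 = 1
          · rw [if_pos hp, toM_matMul, hsq, ← pow_mul, mul_assoc, ← pow_succ',
              show 2 * ((e + 1) / 2) + 1 = e + 1 from by omega]
          · rw [if_neg hp, hsq, ← pow_mul,
              show 2 * ((e + 1) / 2) = e + 1 from by omega]

lemma T0_entry (i j : Fin 31) :
    (T0.getD i.val []).getD j.val 0 =
      if i.val < 30 then (if j.val = i.val + 1 then (1 : Int) else 0)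
      else (if j.val = 0 ∨ j.val = 28 then (1 : Int) else 0) := by
  unfold T0
  by_cases hi : i.val < 30
  · rw [if_pos hi, List.getD_append _ _ _ _ (by simp; omega),
      getD_map_range _ _ hi, getD_map_range _ _ j.isLt]
  · have h30 : i.val = 30 := by omega
    rw [if_neg hi, List.getD_append_right _ _ _ _ (by simp; omega)]
    simp only [List.length_map, List.length_range, h30]
    norm_num

lemma T0_mulVec (init : List Int) (k : Nat) :
    (toM T0).mulVec (VecZ init k) = VecZ init (k + 1) := by
  funext i
  simp only [Matrix.mulVec, dotProduct, toM_apply, T0_entry]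
  by_cases hi : i.val < 30
  · simp only [if_pos hi]
    have key : ∀ j : Fin 31,
        (((if j.val = i.val + 1 then (1 : Int) else 0) : Int) : ZMod 4294967296) * VecZ init k j =
          if j = (⟨i.val + 1, by omega⟩ : Fin 31) then VecZ init k j else 0 := by
      intro j
      by_cases hj : j = (⟨i.val + 1, by omega⟩ : Fin 31)
      · have : j.val = i.val + 1 := by rw [hj]
        simp [hj, this]
      · have : j.val ≠ i.val + 1 := fun hv => hj (Fin.ext hv)
        simp [hj, this]
    rw [Finset.sum_congr rfl (fun j _ => key j), Finset.sum_ite_eq' Finset.univ]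
    simp only [Finset.mem_univ, if_pos]
    show ((U init (k + (i.val + 1)) : Int) : ZMod 4294967296) = _
    unfold VecZ
    congr 2
    omega
  · have h30 : i.val = 30 := by omega
    simp only [if_neg hi]
    have key : ∀ j : Fin 31,
        (((if j.val = 0 ∨ j.val = 28 then (1 : Int) else 0) : Int) : ZMod 4294967296) * VecZ init k j =
          (if j = (0 : Fin 31) then VecZ init k j else 0) +
          (if j = (28 : Fin 31) then VecZ init k j else 0) := by
      intro j
      by_cases h0 : j = (0 : Fin 31)
      · subst h0
        have hv : ((0 : Fin 31) : Nat) = 0 := rfl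
        have hne : ¬ ((0 : Fin 31) = (28 : Fin 31)) := by decide
        simp [hv, hne]
      · by_cases h28 : j = (28 : Fin 31)
        · subst h28
          have hv : ((28 : Fin 31) : Nat) = 28 := rfl
          simp [hv, h0]
        · have hv0 : j.val ≠ 0 := by
            intro hv; exact h0 (Fin.ext hv)
          have hv28 : j.val ≠ 28 := by
            intro hv; exact h28 (Fin.ext hv)
          simp [h0, h28, hv0, hv28]
    rw [Finset.sum_congr rfl (fun j _ => key j), Finset.sum_add_distrib,
      Finset.sum_ite_eq' Finset.univ, Finset.sum_ite_eq' Finset.univ]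
    simp only [Finset.mem_univ, if_pos]
    show ((U init (k + ((0 : Fin 31) : Nat)) : Int) : ZMod 4294967296) +
        ((U init (k + ((28 : Fin 31) : Nat)) : Int) : ZMod 4294967296) = ((U init (k + 1 + i.val) : Int) : ZMod 4294967296)
    have hv0 : ((0 : Fin 31) : Nat) = 0 := rfl
    have hv28 : ((28 : Fin 31) : Nat) = 28 := rfl
    rw [hv0, hv28]
    rw [h30]
    have hU : U init (k + 1 + 30) = U init (k + 28) + U init k := by
      rw [U, if_neg (by omega : ¬ k + 1 + 30 < 31)]
      have e1 : k + 1 + 30 - 3 = k + 28 := by omega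
      have e2 : k + 1 + 30 - 31 = k := by omega
      rw [e1, e2]
    rw [hU, Nat.add_zero]
    push_cast
    ring

lemma pow_mulVec (init : List Int) (n : Nat) :
    ((toM T0) ^ n).mulVec (VecZ init 0) = VecZ init n := by
  induction n with
  | zero => simp [Matrix.one_mulVec]
  | succ n ih => rw [pow_succ', ← Matrix.mulVec_mulVec, ih, T0_mulVec]

lemma w_cast (init : List Int) (j : Fin 31) :
    ((init.getD ((j.val + 3) % 31) 0 : Int) : ZMod 4294967296) = VecZ init 0 j := by
  unfold VecZ
  rw [U, if_pos (by omega : 0 + j.val < 31)]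
  congr 2
  omega

-- dropping the zero-coefficient terms does not change the sum
lemma sum_filter_ne_zero (c w : Nat → Int) (l : List Nat) :
    ((l.filter (fun j => c j != 0)).map (fun j => c j * w j)).sum =
      (l.map (fun j => c j * w j)).sum := by
  induction l with
  | nil => rfl
  | cons x xs ih =>
      by_cases h : c x = 0
      · simp [List.filter_cons, h, ih]
      · simp [List.filter_cons, h, ih]

-- B's final sum, characterised: it is U (n+30) reduced mod 2^32
lemma B_char (init : List Int) (n : Nat) :
    PySem.Int.mod
      ((((List.range 31).filter (fun j => ((powLoop n idMat T0).getD 30 []).getD j 0 != 0)).map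
        (fun j => ((powLoop n idMat T0).getD 30 []).getD j 0 * init.getD ((j + 3) % 31) 0)).sum)
      4294967296 = U init (n + 30) % 4294967296 := by
  rw [sum_filter_ne_zero (fun j => ((powLoop n idMat T0).getD 30 []).getD j 0)
    (fun j => init.getD ((j + 3) % 31) 0) (List.range 31)]
  have hc : ((((List.range 31).map
        (fun j => ((powLoop n idMat T0).getD 30 []).getD j 0 * init.getD ((j + 3) % 31) 0)).sum : Int)
        : ZMod 4294967296) = ((U init (n + 30) : Int) : ZMod 4294967296) := by
    rw [sum_cast]
    have key : ∀ j : Fin 31,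
        ((((powLoop n idMat T0).getD 30 []).getD j.val 0 * init.getD ((j.val + 3) % 31) 0 : Int)
          : ZMod 4294967296) =
        toM (powLoop n idMat T0) (⟨30, by omega⟩ : Fin 31) j * VecZ init 0 j := by
      intro j
      push_cast
      rw [w_cast, toM_apply]
      rfl
    rw [Finset.sum_congr rfl (fun j _ => key j)]
    have hmv : (∑ j : Fin 31,
        toM (powLoop n idMat T0) (⟨30, by omega⟩ : Fin 31) j * VecZ init 0 j) =
        (toM (powLoop n idMat T0)).mulVec (VecZ init 0) (⟨30, by omega⟩ : Fin 31) := by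
      simp [Matrix.mulVec, dotProduct]
    rw [hmv, powLoop_inv, toM_idMat, one_mul, pow_mulVec]
    rfl
  rw [modM_eq_emod]
  have hmod := (ZMod.intCast_eq_intCast_iff _ _ _).mp hc
  have : ((4294967296 : Nat) : Int) = 4294967296 := by norm_num
  unfold Int.ModEq at hmod
  rw [this] at hmod
  exact hmod

-- ===== VERDICT (by name: the statement is the Claim_ definition above) =====
theorem generateRandom_spec : Claim_equal_generateRandom := by
  intro ord init _hdom hpre
  unfold Spec_generateRandom generateRandom generateRandom_alt
  by_cases hord : ord ≤ 0
  · simp [PySem.List.pyRange_one_eq_nil hord, hord]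
  · replace hord : 0 < ord := by omega
    rw [if_neg (not_le.mpr hord)]
    dsimp only
    obtain ⟨N, rfl⟩ : ∃ N : Nat, ord = (N : Int) :=
      ⟨ord.toNat, (Int.toNat_of_nonneg hord.le).symm⟩
    obtain ⟨k, rfl⟩ : ∃ k : Nat, N = k + 1 := ⟨N - 1, by omega⟩
    rw [copy_eq, List.nil_append, PySem.List.pyRange_one]
    have hT : (((k + 1 : Nat) : Int) - 0).toNat = k + 1 := by omega
    rw [hT, LA init (k + 1)]
    have htn : ((k + 1 : Nat) : Int).toNat = k + 1 := by omega
    rw [htn, B_char init (k + 1)]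
    have H : 31 ≤ init.length ∨ k + 2 < init.length := by
      rcases hpre (by push_cast; omega) with h | h
      · exact Or.inl h
      · right; omega
    show RA init (k + 1) = _
    rw [RA, TA_U init k H _ (by omega), TA_U init k H _ (by omega), idx_f, idx_r]
    have hU : U init (k + 1 + 30) = U init (k + 28) + U init k := by
      rw [U, if_neg (by omega : ¬ k + 1 + 30 < 31)]
      have e1 : k + 1 + 30 - 3 = k + 28 := by omega
      have e2 : k + 1 + 30 - 31 = k := by omega
      rw [e1, e2]
    rw [hU, Lkey (U init (k + 28) + U init k), add_comm (U init k)]
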